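-- pv_equiv track=rewrite | github.com/SerginhoDom/Study_stuff | Courses/pythonProject/8.py | sum_blocks
-- ===== SOURCE A (Python) =====
-- def sum_blocks(matrix, k):
--     rows = len(matrix)
--     cols = len(matrix[0]) if rows > 0 else 0
--
--     result = []
--
--     for i in range(0, rows, k):
--         result_row = []
--         for j in range(0, cols, k):
--             block_sum = 0
--
--             # Считаем сумму элементов в текущем блоке
--             for m in range(k):
--                 for n in range(k):
--                     if i + m < rows and j + n < cols:
--                         block_sum += matrix[i + m][j + n]
--
--             result_row.append(block_sum)
--
--         result.append(result_row)
--
--     return result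
-- ===== SOURCE B (Python) =====
-- def sum_blocks(matrix, k):
--     rows = len(matrix)
--     cols = len(matrix[0]) if rows > 0 else 0
--     result = []
--     for start in range(0, rows, k):
--         merged = [0] * cols
--         for row in matrix[start:start + k]:
--             merged = [a + b for a, b in zip(merged, row)]
--         result.append([sum(merged[s:s + k]) for s in range(0, cols, k)])
--     return result
-- ===== Notes on version B (the rewrite author's own statement) =====
-- stated objective: faster
-- what changed: A sums each k-by-k block with four nested index loops and a per-cell bounds check; B is a two-stage reduction: it slices the matrix into bands of k rows, collapses each band to one row by elementwise zip-addition, then emits the band's result row by summing k-wide slices of that collapsed row.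
import Mathlib
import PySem

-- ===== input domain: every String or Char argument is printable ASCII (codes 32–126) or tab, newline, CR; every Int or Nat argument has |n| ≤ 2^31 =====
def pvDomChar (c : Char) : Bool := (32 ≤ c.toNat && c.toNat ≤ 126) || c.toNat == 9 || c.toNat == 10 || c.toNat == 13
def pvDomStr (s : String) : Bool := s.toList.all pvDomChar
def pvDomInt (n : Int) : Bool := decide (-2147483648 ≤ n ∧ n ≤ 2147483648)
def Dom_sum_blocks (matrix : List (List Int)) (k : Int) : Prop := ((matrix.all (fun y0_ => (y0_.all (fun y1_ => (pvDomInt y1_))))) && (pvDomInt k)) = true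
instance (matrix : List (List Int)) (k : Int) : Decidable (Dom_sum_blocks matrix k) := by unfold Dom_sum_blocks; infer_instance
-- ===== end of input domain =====

-- B replaces A's four nested index loops (per-block gather with bounds checks) by a two-stage
-- reduction: slice the matrix into bands of k rows, collapse each band by elementwise addition,
-- then sum k-wide slices of the collapsed row (bulk zip/sum instead of per-cell index loops).

-- ===== PORT A =====
def sum_blocks (matrix : List (List Int)) (k : Int) : List (List Int) :=
  let rows : Int := PySem.List.len matrix
  let cols : Int := if rows > 0 then PySem.List.len (PySem.List.pyGetD matrix 0 []) else 0
  (PySem.List.pyRange 0 rows k).foldl (fun result i =>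
    result ++ [(PySem.List.pyRange 0 cols k).foldl (fun result_row j =>
      result_row ++ [(PySem.List.pyRange 0 k).foldl (fun bs m =>
        (PySem.List.pyRange 0 k).foldl (fun bs n =>
          if i + m < rows ∧ j + n < cols then
            bs + PySem.List.pyGetD (PySem.List.pyGetD matrix (i + m) []) (j + n) 0
          else bs) bs) 0]) []]) []

-- ===== PORT B =====
def sum_blocks_alt (matrix : List (List Int)) (k : Int) : List (List Int) :=
  let rows : Int := PySem.List.len matrix
  let cols : Int := if rows > 0 then PySem.List.len (PySem.List.pyGetD matrix 0 []) else 0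
  (PySem.List.pyRange 0 rows k).foldl (fun result start =>
    let merged := (PySem.List.slice matrix (some start) (some (start + k))).foldl
      (fun merged row => List.zipWith (· + ·) merged row) (List.replicate cols.toNat 0)
    result ++ [(PySem.List.pyRange 0 cols k).map (fun s =>
      (PySem.List.slice merged (some s) (some (s + k))).sum)]) []

-- ===== PRECONDITION & SPEC =====
-- Pre_ excludes exactly the inputs where Python A raises: k = 0 (range step 0, ValueError) and,
-- for k > 0, matrices with a row shorter than the first row (IndexError while gathering a block).
def Pre_sum_blocks (matrix : List (List Int)) (k : Int) : Prop :=
  k ≠ 0 ∧ (k < 0 ∨ ∀ row ∈ matrix, (matrix.headD []).length ≤ row.length)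
instance (matrix : List (List Int)) (k : Int) : Decidable (Pre_sum_blocks matrix k) := by
  unfold Pre_sum_blocks; infer_instance

def pvWitness_sum_blocks : List (List Int) × Int := ([[1, 2, 3], [4, 5, 6], [7, 8, 9]], 2)

def Spec_sum_blocks (matrix : List (List Int)) (k : Int) (out : List (List Int)) : Prop := out = sum_blocks_alt matrix k
instance (matrix : List (List Int)) (k : Int) (out : List (List Int)) : Decidable (Spec_sum_blocks matrix k out) := by unfold Spec_sum_blocks; infer_instance

-- ===== CLAIM (what is proved, stated in full; the proofs are below) =====
def Claim_equal_sum_blocks : Prop := ∀ (matrix : List (List Int)) (k : Int), Dom_sum_blocks matrix k → Pre_sum_blocks matrix k → Spec_sum_blocks matrix k (sum_blocks matrix k)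

-- ===== LEMMAS AND PROOFS =====

-- range(0, b, s) is empty for negative step and 0 ≤ b
lemma pyRange_neg_nil {b s : Int} (hs : s < 0) (hb : 0 ≤ b) : PySem.List.pyRange 0 b s = [] := by
  unfold PySem.List.pyRange
  rw [if_neg (by omega : ¬ s = 0)]
  rw [if_neg (by omega : ¬ 0 < s), if_neg (by omega : ¬ b < 0)]
  simp

-- 'if p then acc + v else acc' loop as a sum
lemma foldl_if_add (l : List Int) (p : Int → Prop) [DecidablePred p] (v : Int → Int) (a : Int) :
    l.foldl (fun bs n => if p n then bs + v n else bs) a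
      = a + (l.map (fun n => if p n then v n else 0)).sum := by
  have h : (fun (bs : Int) n => if p n then bs + v n else bs)
      = fun bs n => bs + (if p n then v n else 0) := by
    funext bs n; split <;> simp
  rw [h, PySem.List.foldl_add]

-- bridge: list-map sum over range IS the Finset sum
lemma listsum_range (K : Nat) (f : Nat → Int) :
    ((List.range K).map f).sum = ∑ n ∈ Finset.range K, f n := rfl

lemma sum_ite_min (K t : Nat) (f : Nat → Int) :
    (∑ n ∈ Finset.range K, if n < t then f n else 0) = ∑ n ∈ Finset.range (min K t), f n := by
  induction K with
  | zero => simp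
  | succ K ih =>
    rw [Finset.sum_range_succ, ih]
    by_cases h : K < t
    · rw [if_pos h, min_eq_left (by omega), min_eq_left (by omega), Finset.sum_range_succ]
    · rw [if_neg h, min_eq_right (by omega), min_eq_right (by omega), add_zero]

lemma map_getD_range (l : List Int) : (List.range l.length).map (fun n => l.getD n 0) = l := by
  apply List.ext_getElem
  · simp
  · intro n h1 h2
    simp [List.getD_eq_getElem?_getD, List.getElem?_eq_getElem h2]

lemma sum_eq_range (l : List Int) : l.sum = ∑ n ∈ Finset.range l.length, l.getD n 0 := by
  conv_lhs => rw [← map_getD_range l]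
  exact listsum_range _ _

lemma sum_drop_take (l : List Int) (a t : Nat) :
    ((l.drop a).take t).sum = ∑ m ∈ Finset.range (min t (l.length - a)), l.getD (a + m) 0 := by
  rw [sum_eq_range]
  have hlen : ((l.drop a).take t).length = min t (l.length - a) := by simp
  rw [hlen]
  refine Finset.sum_congr rfl ?_
  intro m hm
  have hm' : m < min t (l.length - a) := Finset.mem_range.mp hm
  have h2 : a + m < l.length := by omega
  rw [List.getD_eq_getElem _ _ (by rw [hlen]; exact hm'), List.getD_eq_getElem _ _ h2]
  simp

-- the band fold of zipWith-additions, characterised pointwise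
lemma zip_fold_spec (band : List (List Int)) :
    ∀ (init : List Int), (∀ r ∈ band, init.length ≤ r.length) →
    band.foldl (fun a r => List.zipWith (· + ·) a r) init
      = (List.range init.length).map (fun t => init.getD t 0 + (band.map (fun r => r.getD t 0)).sum) := by
  induction band with
  | nil =>
    intro init _
    simp only [List.foldl_nil, List.map_nil, List.sum_nil, add_zero]
    exact (map_getD_range init).symm
  | cons r band ih =>
    intro init h
    have hr : init.length ≤ r.length := h r (List.mem_cons_self)
    have hzlen : (List.zipWith (· + ·) init r).length = init.length := by
      simp [List.length_zipWith]; omega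
    simp only [List.foldl_cons]
    rw [ih (List.zipWith (· + ·) init r) (by intro x hx; rw [hzlen]; exact h x (List.mem_cons_of_mem _ hx))]
    rw [hzlen]
    refine List.map_congr_left ?_
    intro t ht
    have ht' : t < init.length := List.mem_range.mp ht
    have h1 : (List.zipWith (· + ·) init r).getD t 0 = init.getD t 0 + r.getD t 0 := by
      rw [List.getD_eq_getElem _ _ (by omega), List.getD_eq_getElem _ _ ht',
          List.getD_eq_getElem _ _ (by omega)]
      simp
    rw [h1]
    simp [add_assoc]

-- the central per-block identity (k > 0 case), proved in the main theorem below

theorem sum_blocks_eq (matrix : List (List Int)) (k : Int)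
    (hpre : Pre_sum_blocks matrix k) : sum_blocks matrix k = sum_blocks_alt matrix k := by
  obtain ⟨hk0, hrect⟩ := hpre
  by_cases hkneg : k < 0
  · have h0 : (0 : Int) ≤ PySem.List.len matrix := by
      rw [PySem.List.len_eq]; positivity
    simp only [sum_blocks, sum_blocks_alt, pyRange_neg_nil hkneg h0, List.foldl_nil]
  · have hk : 0 < k := by omega
    have hrect' : ∀ row ∈ matrix, (matrix.headD []).length ≤ row.length := by
      rcases hrect with h | h
      · omega
      · exact h
    simp only [sum_blocks, sum_blocks_alt, PySem.List.len_eq]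
    rw [PySem.List.foldl_append_singleton_eq_map, PySem.List.foldl_append_singleton_eq_map]
    simp only [List.nil_append]
    refine List.map_congr_left ?_
    intro i hi
    rw [PySem.List.mem_pyRange_iff_of_pos hk] at hi
    obtain ⟨hi0, hiR, -⟩ := hi
    have hRpos : (0:Int) < ↑matrix.length := lt_of_le_of_lt hi0 hiR
    have hcolsif : (if (↑matrix.length:Int) > 0 then (↑(PySem.List.pyGetD matrix 0 []).length:Int) else 0)
        = ((matrix.headD []).length : Int) := by
      rw [if_pos hRpos, PySem.List.pyGetD_zero]
      cases matrix with
      | nil => simp at hRpos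
      | cons a l => simp
    rw [hcolsif]
    rw [PySem.List.foldl_append_singleton_eq_map]
    simp only [List.nil_append]
    refine List.map_congr_left ?_
    intro j hj
    rw [PySem.List.mem_pyRange_iff_of_pos hk] at hj
    obtain ⟨hj0, hjC, -⟩ := hj
    -- names
    set K := k.toNat with hK
    set R := matrix.length with hR
    set C := (matrix.headD []).length with hC
    have hkK : k = (K : Int) := by omega
    set iN := i.toNat with hiN
    set jN := j.toNat with hjN
    have hii : i = (iN : Int) := by omega
    have hjj : j = (jN : Int) := by omega
    have hiNR : iN < R := by omega
    have hjNC : jN < C := by omega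
    -- ===== LHS to a double Finset sum =====
    have hinner : (fun (bs : Int) m => List.foldl
        (fun bs n => if i + m < (R:Int) ∧ j + n < (C:Int) then
            bs + PySem.List.pyGetD (PySem.List.pyGetD matrix (i + m) []) (j + n) 0 else bs)
        bs (PySem.List.pyRange 0 k))
        = fun bs m => bs + ((PySem.List.pyRange 0 k).map
            (fun n => if i + m < (R:Int) ∧ j + n < (C:Int) then
              PySem.List.pyGetD (PySem.List.pyGetD matrix (i + m) []) (j + n) 0 else 0)).sum := by
      funext bs m
      rw [foldl_if_add]
    rw [hinner, PySem.List.foldl_add, zero_add]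
    -- switch ranges to List.range K
    rw [hkK, PySem.List.pyRange_zero_nat K]
    simp only [List.map_map, Function.comp_def]
    rw [listsum_range]
    -- term-level Nat rewrite
    have hterm : ∀ m n : Nat,
        (if i + (m:Int) < (R:Int) ∧ j + (n:Int) < (C:Int) then
          PySem.List.pyGetD (PySem.List.pyGetD matrix (i + (m:Int)) []) (j + (n:Int)) 0 else 0)
        = (if m < R - iN then (if n < C - jN then ((matrix.getD (iN+m) []).getD (jN+n) 0) else 0) else 0) := by
      intro m n
      by_cases h1 : m < R - iN
      · by_cases h2 : n < C - jN
        · rw [if_pos ⟨by omega, by omega⟩, if_pos h1, if_pos h2]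
          have e1 : i + (m:Int) = ((iN + m : Nat) : Int) := by omega
          have e2 : j + (n:Int) = ((jN + n : Nat) : Int) := by omega
          rw [e1, PySem.List.pyGetD_natCast, e2, PySem.List.pyGetD_natCast]
        · rw [if_neg (by omega), if_pos h1, if_neg h2]
      · rw [if_neg (by omega), if_neg h1]
    have hA : (∑ m ∈ Finset.range K, (List.map
          (fun (n : Nat) => if i + (m:Int) < (R:Int) ∧ j + (n:Int) < (C:Int) then
            PySem.List.pyGetD (PySem.List.pyGetD matrix (i + (m:Int)) []) (j + (n:Int)) 0 else 0)
          (List.range K)).sum)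
        = ∑ n ∈ Finset.range (min K (C - jN)), ∑ m ∈ Finset.range (min K (R - iN)),
            ((matrix.getD (iN+m) []).getD (jN+n) 0) := by
      rw [← Finset.sum_comm]
      rw [← sum_ite_min]
      refine Finset.sum_congr rfl ?_
      intro m _
      rw [listsum_range]
      by_cases h1 : m < R - iN
      · rw [if_pos h1, ← sum_ite_min]
        refine Finset.sum_congr rfl ?_
        intro n _
        rw [hterm m n, if_pos h1]
      · rw [if_neg h1]
        calc (∑ n ∈ Finset.range K, if i + (m:Int) < (R:Int) ∧ j + (n:Int) < (C:Int) then
                PySem.List.pyGetD (PySem.List.pyGetD matrix (i + (m:Int)) []) (j + (n:Int)) 0 else 0)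
            = ∑ n ∈ Finset.range K, (0:Int) := by
              refine Finset.sum_congr rfl ?_
              intro n _
              rw [hterm m n, if_neg h1]
          _ = 0 := Finset.sum_const_zero
    rw [hA]
    -- ===== RHS =====
    rw [hii, hjj]
    rw [PySem.List.slice_natCast_add, PySem.List.slice_natCast_add]
    have hrep : ((C:Int)).toNat = C := Int.toNat_natCast C
    rw [hrep]
    set band := (matrix.drop iN).take K with hband
    have hbandmem : ∀ r ∈ band, r ∈ matrix := by
      intro r hr
      exact List.mem_of_mem_drop (List.mem_of_mem_take hr)
    have hlenrep : (List.replicate C (0:Int)).length = C := List.length_replicate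
    rw [zip_fold_spec band (List.replicate C (0:Int))
        (by intro r hr; rw [hlenrep]; exact hrect' r (hbandmem r hr))]
    rw [hlenrep]
    set h := fun t => (List.replicate C (0:Int)).getD t 0 + (band.map (fun r => r.getD t 0)).sum with hh
    have hlenmap : ((List.range C).map h).length = C := by simp
    rw [sum_drop_take, hlenmap]
    refine Finset.sum_congr rfl ?_
    intro n hn
    have hn' : n < min K (C - jN) := Finset.mem_range.mp hn
    have hjnC : jN + n < C := by omega
    have hgetd : ((List.range C).map h).getD (jN + n) 0 = h (jN + n) := by
      rw [List.getD_eq_getElem _ _ (by simpa using hjnC)]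
      simp
    rw [hgetd, hh]
    beta_reduce
    have hrep0 : (List.replicate C (0:Int)).getD (jN + n) 0 = 0 := by
      rcases Nat.lt_or_ge (jN + n) C with hlt | hge
      · rw [List.getD_eq_getElem _ _ (by simpa using hlt)]
        simp
      · rw [List.getD_eq_default _ _ (by simpa using hge)]
    rw [hrep0, zero_add]
    -- band.map sum = inner m-sum
    have hmapband : band.map (fun r => r.getD (jN + n) 0)
        = (((matrix.map (fun r => r.getD (jN + n) 0)).drop iN).take K) := by
      rw [hband, List.map_take, List.map_drop]
    rw [hmapband, sum_drop_take]
    have hlenmap2 : (matrix.map (fun r => r.getD (jN + n) 0)).length = R := by simp [hR]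
    rw [hlenmap2]
    refine Finset.sum_congr rfl ?_
    intro m hm
    have hm' : m < min K (R - iN) := Finset.mem_range.mp hm
    have himR : iN + m < R := by omega
    rw [List.getD_eq_getElem (List.map (fun r => r.getD (jN + n) 0) matrix) _ (by simpa [hR] using himR)]
    rw [List.getElem_map]
    rw [List.getD_eq_getElem matrix _ (by simpa [hR] using himR)]

-- ===== VERDICT (by name: the statement is the Claim_ definition above) =====
theorem sum_blocks_spec : Claim_equal_sum_blocks := by
  intro matrix k _ hpre
  unfold Spec_sum_blocks
  exact sum_blocks_eq matrix k hpre
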